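-- pv_equiv track=rewrite | github.com/imjiaoyuan/jutils | src/jsrc/job/commands.py | _etime_to_seconds
-- ===== SOURCE A (Python) =====
-- def _to_int(value: str, default: int = 0) -> int:
--     try:
--         return int(value)
--     except Exception:
--         return default
--
-- def _etime_to_seconds(etime: str) -> int:
--     if not etime:
--         return 0
--     days = 0
--     if "-" in etime:
--         d, rest = etime.split("-", 1)
--         days = _to_int(d, 0)
--         etime = rest
--     parts = etime.split(":")
--     if len(parts) == 3:
--         h, m, s = (_to_int(x, 0) for x in parts)
--     elif len(parts) == 2:
--         h = 0
--         m, s = (_to_int(x, 0) for x in parts)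
--     else:
--         h = 0
--         m = 0
--         s = _to_int(parts[0], 0)
--     return days * 86400 + h * 3600 + m * 60 + s
-- ===== SOURCE B (Python) =====
-- def _to_int(value: str, default: int = 0) -> int:
--     try:
--         return int(value)
--     except Exception:
--         return default
--
-- def _etime_to_seconds(etime: str) -> int:
--     # peel fields off the right end with rpartition: seconds, minutes, hours
--     head, sep, clock = etime.partition("-")
--     total = _to_int(head, 0) * 86400 if sep else 0
--     if not sep:
--         clock = head
--     unit = 1
--     while True:
--         clock, sep, field = clock.rpartition(":")
--         total += unit * _to_int(field, 0)
--         if not sep or unit == 3600: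
--             return total
--         unit *= 60
-- ===== Notes on version B (the rewrite author's own statement) =====
-- stated objective: alternative
-- what changed: Replaces A's split-into-a-list + arity branch ladder by right-to-left peeling: repeatedly rpartition the clock at its last colon and add field*unit with unit stepping through 1, 60, 3600, so no parts list and no length cases exist.
-- intended difference: On inputs whose clock part has four or more colon-separated fields and whose first field's integer value differs from the H:M:S value of the trailing three fields, A returns days*86400 plus the first field read as plain seconds (silently discarding everything else), while B returns the right-aligned reading 3600*h + 60*m + s of the trailing three fields, the intended semantics of the [[dd-]hh:]mm:ss etime format (witness '1:2:3:4': A gives 1, B gives 7384). — e.g. on _etime_to_seconds("1:2:3:4"): A returns 1, B returns 7384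
import Mathlib
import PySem

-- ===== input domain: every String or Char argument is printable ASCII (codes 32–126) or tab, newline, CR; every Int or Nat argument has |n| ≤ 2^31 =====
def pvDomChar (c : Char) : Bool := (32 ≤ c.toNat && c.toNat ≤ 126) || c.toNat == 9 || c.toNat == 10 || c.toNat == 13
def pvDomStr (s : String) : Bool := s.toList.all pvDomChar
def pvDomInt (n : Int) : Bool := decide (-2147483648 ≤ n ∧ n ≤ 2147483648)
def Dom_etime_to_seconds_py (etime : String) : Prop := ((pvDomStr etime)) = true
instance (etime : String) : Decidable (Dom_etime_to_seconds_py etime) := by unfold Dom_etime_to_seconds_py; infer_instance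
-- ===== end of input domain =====

-- B replaces A's split-into-a-list + arity branch ladder by right-to-left rpartition peeling
-- (objective: alternative decomposition, same cost); on clocks with ≥4 ':'-fields the two differ (see D_ below).

-- ===== PORT A =====
-- shared module helper _to_int(value, default=0): int(value) with every exception swallowed
def to_int (value : String) (default : Int) : Int :=
  match PySem.Int.ofStr? value with
  | some n => n
  | none => default

def etime_to_seconds_py (etime : String) : Int :=
  if etime.toList = [] then 0      -- if not etime: return 0
  else
    -- days = 0; if "-" in etime: d, rest = etime.split("-", 1); days = _to_int(d, 0); etime = rest
    let dr : Int × String :=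
      if PySem.Str.isIn "-" etime then
        match PySem.Str.splitMax? etime "-" 1 with
        | some (d :: rest :: _) => (to_int d 0, rest)
        | _ => (0, etime)          -- unreachable: split on a present, nonempty sep yields two pieces
      else (0, etime)
    -- parts = etime.split(":")
    let parts : List String := (PySem.Str.split? dr.2 ":").getD []   -- getD unreachable: sep ≠ ""
    -- the len(parts) branch ladder: 3 → h,m,s; 2 → m,s; else → s = _to_int(parts[0], 0)
    let hms : Int × Int × Int :=
      match parts with
      | [h, m, s] => (to_int h 0, to_int m 0, to_int s 0)
      | [m, s] => (0, to_int m 0, to_int s 0)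
      | p :: _ => (0, 0, to_int p 0)
      | [] => (0, 0, 0)            -- unreachable: str.split always yields at least one piece
    dr.1 * 86400 + hms.1 * 3600 + hms.2.1 * 60 + hms.2.2

-- ===== PORT B =====
-- B's copy of the module helper _to_int, on the char-list side
def to_int_b (cs : List Char) (default : Int) : Int :=
  (PySem.Int.ofChars? cs).getD default

-- hand port of str.partition("-") restricted to what B uses: some (before, after) at the
-- FIRST '-', none when no '-' occurs (exact: a one-char separator is a char-equality scan)
def partDash : List Char → Option (List Char × List Char)
  | [] => none
  | a :: rest =>
      if a = '-' then some ([], rest)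
      else match partDash rest with
        | some pq => some (a :: pq.1, pq.2)
        | none => none

-- hand port of str.rpartition(":") restricted to what B uses: some (before, after) at the
-- LAST ':', none when no ':' occurs (exact: a one-char separator is a char-equality scan)
def rpartColon : List Char → Option (List Char × List Char)
  | [] => none
  | a :: rest =>
      match rpartColon rest with
      | some pq => some (a :: pq.1, pq.2)
      | none => if a = ':' then some ([], rest) else none

-- B's while loop: clock, sep, field = clock.rpartition(":"); total += unit*_to_int(field);
-- break when no sep or unit == 3600, else unit *= 60.  The unit ladder 1,60,3600 bounds the
-- loop to three iterations, so it is written with fuel 3 (the 0 case is unreachable).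
def peel : Nat → Int → Int → List Char → Int
  | 0, total, _, _ => total
  | fuel + 1, total, unit, clock =>
      match rpartColon clock with
      | none => total + unit * to_int_b clock 0
      | some (pre, field) =>
          let t := total + unit * to_int_b field 0
          if unit = 3600 then t else peel fuel t (unit * 60) pre

def etime_to_seconds_py_alt (etime : String) : Int :=
  -- head, sep, clock = etime.partition("-"); total = _to_int(head)*86400 if sep else 0
  match partDash etime.toList with
  | some dp => peel 3 (to_int_b dp.1 0 * 86400) 1 dp.2
  | none => peel 3 0 1 etime.toList

-- ===== PRECONDITION & SPEC =====
-- int(field) with ValueError read as 0 — the numeric value of one field, used only to state D_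
def fieldVal (cs : List Char) : Int := (PySem.Int.ofChars? cs).getD 0

-- On inputs whose clock part has four or more colon-separated fields AND whose first field's
-- integer value differs from the H:M:S value of the trailing three fields, A returns
-- days*86400 plus the first field read as plain seconds (it silently discards the rest), while
-- B returns the right-aligned reading 3600*h + 60*m + s of the trailing three fields, the
-- intended semantics of the [[dd-]hh:]mm:ss etime format.
def D_etime_to_seconds_py (etime : String) : Prop :=
  let fs := PySem.Chars.splitOn
    (if etime.toList.contains '-' then (etime.toList.dropWhile (· ≠ '-')).tail else etime.toList)
    [':']
  4 ≤ fs.length ∧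
    fieldVal (fs.headD []) ≠
      3600 * fieldVal (fs.reverse.getD 2 []) + 60 * fieldVal (fs.reverse.getD 1 []) +
        fieldVal (fs.reverse.getD 0 [])
instance (etime : String) : Decidable (D_etime_to_seconds_py etime) := by unfold D_etime_to_seconds_py; infer_instance

def Spec_etime_to_seconds_py (etime : String) (out : Int) : Prop :=
  ¬ D_etime_to_seconds_py etime → out = etime_to_seconds_py_alt etime
instance (etime : String) (out : Int) : Decidable (Spec_etime_to_seconds_py etime out) := by unfold Spec_etime_to_seconds_py; infer_instance

def pvDiffWitness_etime_to_seconds_py : String := "1:2:3:4"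
def pvDiffWitnessOut_etime_to_seconds_py : Int × Int := (1, 7384)

-- ===== CLAIM (what is proved, stated in full; the proofs are below) =====
def Claim_unchanged_etime_to_seconds_py : Prop := ∀ (etime : String), Dom_etime_to_seconds_py etime → Spec_etime_to_seconds_py etime (etime_to_seconds_py etime)
def Claim_changed_etime_to_seconds_py : Prop := Dom_etime_to_seconds_py (pvDiffWitness_etime_to_seconds_py) ∧ D_etime_to_seconds_py (pvDiffWitness_etime_to_seconds_py) ∧ etime_to_seconds_py (pvDiffWitness_etime_to_seconds_py) = pvDiffWitnessOut_etime_to_seconds_py.1 ∧ etime_to_seconds_py_alt (pvDiffWitness_etime_to_seconds_py) = pvDiffWitnessOut_etime_to_seconds_py.2 ∧ pvDiffWitnessOut_etime_to_seconds_py.1 ≠ pvDiffWitnessOut_etime_to_seconds_py.2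
def Claim_exact_etime_to_seconds_py : Prop := ∀ (etime : String), Dom_etime_to_seconds_py etime → D_etime_to_seconds_py etime → etime_to_seconds_py etime ≠ etime_to_seconds_py_alt etime

-- ===== LEMMAS AND PROOFS =====

-- proof-side single-char ':'-splitter (proved equal to Chars.splitOn · [':'] below)
def splitRec : List Char → List (List Char)
  | [] => [[]]
  | a :: rest =>
      if a = ':' then [] :: splitRec rest
      else match splitRec rest with
        | r :: rs => (a :: r) :: rs
        | [] => [[a]]

lemma splitRec_ne_nil (cs : List Char) : splitRec cs ≠ [] := by
  cases cs with
  | nil => simp [splitRec]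
  | cons a rest =>
      simp only [splitRec]
      split
      · simp
      · cases h : splitRec rest <;> simp

lemma splitOn_go_colon (fuel : Nat) :
    ∀ (l cur : List Char) (acc : List (List Char)), l.length < fuel →
      PySem.Chars.splitOn.go [':'] fuel l cur acc =
        acc.reverse ++ (match splitRec l with
          | r :: rs => (cur.reverse ++ r) :: rs
          | [] => [cur.reverse]) := by
  induction fuel with
  | zero => intro l cur acc h; omega
  | succ n ih =>
      intro l cur acc h
      cases l with
      | nil => simp [PySem.Chars.splitOn.go, splitRec]
      | cons c rest =>
          simp only [PySem.Chars.splitOn.go]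
          by_cases hc : c = ':'
          · have hpre : List.isPrefixOf [':'] (c :: rest) = true := by
              simp [List.isPrefixOf, hc]
            rw [if_pos hpre]
            have := ih rest [] (cur.reverse :: acc) (by simp at h; omega)
            simp only [List.drop_succ_cons, List.drop_zero, List.length_singleton] at this ⊢
            rw [this]
            simp only [splitRec, if_pos hc]
            cases hs : splitRec rest with
            | nil => exact absurd hs (splitRec_ne_nil rest)
            | cons r rs => simp
          · have hpre : List.isPrefixOf [':'] (c :: rest) = false := by
              simp [List.isPrefixOf]
              exact fun hcc => hc hcc.symm
            rw [if_neg (by simp [hpre])]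
            have := ih rest (c :: cur) acc (by simp at h; omega)
            rw [this]
            simp only [splitRec, if_neg hc]
            cases hs : splitRec rest with
            | nil => exact absurd hs (splitRec_ne_nil rest)
            | cons r rs => simp

lemma splitOn_colon_eq (cs : List Char) :
    PySem.Chars.splitOn cs [':'] = splitRec cs := by
  unfold PySem.Chars.splitOn
  rw [splitOn_go_colon (cs.length + 1) cs [] [] (by omega)]
  cases hs : splitRec cs with
  | nil => exact absurd hs (splitRec_ne_nil cs)
  | cons r rs => simp

-- day split: s.split("-", 1) in terms of partDash
lemma splitOnMax_go_dash_zero (fuel : Nat) (l cur : List Char) (acc : List (List Char)) :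
    PySem.Chars.splitOnMax.go ['-'] fuel 0 l cur acc = acc.reverse ++ [cur.reverse ++ l] := by
  cases fuel with
  | zero => simp [PySem.Chars.splitOnMax.go]
  | succ n =>
      cases l with
      | nil => simp [PySem.Chars.splitOnMax.go]
      | cons c rest => simp [PySem.Chars.splitOnMax.go]

lemma splitOnMax_go_dash_one (fuel : Nat) :
    ∀ (l cur : List Char) (acc : List (List Char)), l.length < fuel →
      PySem.Chars.splitOnMax.go ['-'] fuel 1 l cur acc =
        acc.reverse ++ (match partDash l with
          | some (p, q) => [cur.reverse ++ p, q]
          | none => [cur.reverse ++ l]) := by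
  induction fuel with
  | zero => intro l cur acc h; omega
  | succ n ih =>
      intro l cur acc h
      cases l with
      | nil => simp [PySem.Chars.splitOnMax.go, partDash]
      | cons c rest =>
          simp only [PySem.Chars.splitOnMax.go]
          by_cases hc : c = '-'
          · have hpre : List.isPrefixOf ['-'] (c :: rest) = true := by
              simp [List.isPrefixOf, hc]
            rw [if_neg (by omega), if_pos hpre]
            simp only [List.length_singleton, List.drop_succ_cons, List.drop_zero]
            rw [splitOnMax_go_dash_zero]
            simp [partDash, hc]
          · have hpre : List.isPrefixOf ['-'] (c :: rest) = false := by
              simp [List.isPrefixOf]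
              exact fun hcc => hc hcc.symm
            rw [if_neg (by omega), if_neg (by simp [hpre])]
            rw [ih rest (c :: cur) acc (by simp at h; omega)]
            simp only [partDash, if_neg hc]
            cases hp : partDash rest with
            | none => simp
            | some pq => cases pq; simp

lemma partDash_none_iff (cs : List Char) : partDash cs = none ↔ '-' ∉ cs := by
  induction cs with
  | nil => simp [partDash]
  | cons a rest ih =>
      simp only [partDash]
      by_cases ha : a = '-'
      · simp [ha]
      · cases hp : partDash rest with
        | none => simp [ha, Ne.symm ha, ih.mp hp]
        | some pq =>
            simp only [hp, ha, if_neg]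
            simp [Ne.symm ha]
            by_contra hmem
            exact absurd (ih.mpr hmem) (by simp [hp])

lemma partDash_spec (cs p q : List Char) (h : partDash cs = some (p, q)) :
    cs = p ++ '-' :: q ∧ '-' ∉ p := by
  induction cs generalizing p q with
  | nil => simp [partDash] at h
  | cons a rest ih =>
      simp only [partDash] at h
      by_cases ha : a = '-'
      · simp [ha] at h
        obtain ⟨h1, h2⟩ := h
        subst h1; subst h2; simp [ha]
      · simp only [ha, if_neg, if_false] at h
        cases hp : partDash rest with
        | none => rw [hp] at h; simp at h
        | some pq =>
            rw [hp] at h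
            simp at h
            obtain ⟨h1, h2⟩ := h
            obtain ⟨hrest, hnp⟩ := ih pq.1 pq.2 (by rw [hp])
            subst h1
            constructor
            · simp [hrest, h2]
            · simp [hnp]
              exact fun hda => ha hda.symm

lemma splitRec_rpart_none (cs : List Char) (h : rpartColon cs = none) :
    splitRec cs = [cs] := by
  induction cs with
  | nil => simp [splitRec]
  | cons a rest ih =>
      simp only [rpartColon] at h
      cases hr : rpartColon rest with
      | some pq => rw [hr] at h; simp at h
      | none =>
          rw [hr] at h
          by_cases ha : a = ':'
          · simp [ha] at h
          · simp only [splitRec, if_neg ha, ih hr]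

lemma splitRec_rpart_some (cs p f : List Char) (h : rpartColon cs = some (p, f)) :
    splitRec cs = splitRec p ++ [f] := by
  induction cs generalizing p f with
  | nil => simp [rpartColon] at h
  | cons a rest ih =>
      simp only [rpartColon] at h
      cases hr : rpartColon rest with
      | some pq =>
          rw [hr] at h
          simp at h
          obtain ⟨h1, h2⟩ := h
          subst h1
          have hrest := ih pq.1 pq.2 (by rw [hr])
          by_cases ha : a = ':'
          · simp only [splitRec, if_pos ha, hrest, h2]
            simp
          · simp only [splitRec, if_neg ha, hrest]
            cases hs : splitRec pq.1 with
            | nil => exact absurd hs (splitRec_ne_nil pq.1)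
            | cons r rs => rw [h2]; simp [hs, splitRec, if_neg ha]
      | none =>
          rw [hr] at h
          by_cases ha : a = ':'
          · simp [ha] at h
            obtain ⟨h1, h2⟩ := h
            subst h1; subst h2
            simp [splitRec, ha, splitRec_rpart_none rest hr]
          · simp [ha] at h

lemma rpart_some_of_len (cs : List Char) (h : 2 ≤ (splitRec cs).length) :
    ∃ p f, rpartColon cs = some (p, f) := by
  cases hp : rpartColon cs with
  | some pf => obtain ⟨a, b⟩ := pf; exact ⟨a, b, by simp [hp]⟩
  | none => rw [splitRec_rpart_none cs hp] at h; simp at h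

-- the two copies of _to_int agree across the String/List Char boundary
lemma to_int_ofList (p : List Char) (d : Int) :
    to_int (String.ofList p) d = to_int_b p d := by
  unfold to_int to_int_b PySem.Int.ofStr?
  rw [String.toList_ofList]
  cases PySem.Int.ofChars? p <;> rfl

lemma fieldVal_eq (p : List Char) : fieldVal p = to_int_b p 0 := rfl

-- core 1: for a clock with at most three fields, A's arity branch ladder equals B's peel
lemma clock_eq (days : Int) (clock : List Char) (h3 : (splitRec clock).length ≤ 3) :
    days * 86400 +
      (match (splitRec clock).map String.ofList with
        | [h, m, s] => (to_int h 0, to_int m 0, to_int s 0)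
        | [m, s] => ((0 : Int), to_int m 0, to_int s 0)
        | p :: _ => ((0 : Int), (0 : Int), to_int p 0)
        | [] => ((0 : Int), (0 : Int), (0 : Int))).1 * 3600 +
      (match (splitRec clock).map String.ofList with
        | [h, m, s] => (to_int h 0, to_int m 0, to_int s 0)
        | [m, s] => ((0 : Int), to_int m 0, to_int s 0)
        | p :: _ => ((0 : Int), (0 : Int), to_int p 0)
        | [] => ((0 : Int), (0 : Int), (0 : Int))).2.1 * 60 +
      (match (splitRec clock).map String.ofList with
        | [h, m, s] => (to_int h 0, to_int m 0, to_int s 0)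
        | [m, s] => ((0 : Int), to_int m 0, to_int s 0)
        | p :: _ => ((0 : Int), (0 : Int), to_int p 0)
        | [] => ((0 : Int), (0 : Int), (0 : Int))).2.2 =
    peel 3 (days * 86400) 1 clock := by
  rw [show (3 : Nat) = 2 + 1 from rfl]
  cases h1 : rpartColon clock with
  | none =>
      rw [peel, h1, splitRec_rpart_none clock h1]
      simp [to_int_ofList]
  | some pf1 =>
      obtain ⟨p1, f1⟩ := pf1
      rw [peel, h1]
      simp only [if_neg (by norm_num : ¬ (1 : Int) = 3600)]
      rw [splitRec_rpart_some clock p1 f1 h1]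
      have e1 := splitRec_rpart_some clock p1 f1 h1
      rw [show (2 : Nat) = 1 + 1 from rfl]
      cases hp1 : rpartColon p1 with
      | none =>
          rw [peel, hp1, splitRec_rpart_none p1 hp1]
          simp [to_int_ofList]
          ring
      | some pf2 =>
          obtain ⟨p2, f2⟩ := pf2
          rw [peel, hp1]
          simp only [if_neg (by norm_num : ¬ (1 * 60 : Int) = 3600)]
          rw [splitRec_rpart_some p1 p2 f2 hp1]
          have e2 := splitRec_rpart_some p1 p2 f2 hp1
          rw [show (1 : Nat) = 0 + 1 from rfl]
          cases hp2 : rpartColon p2 with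
          | none =>
              rw [peel, hp2, splitRec_rpart_none p2 hp2]
              simp [to_int_ofList]
              ring
          | some pf3 =>
              have e3 := splitRec_rpart_some p2 pf3.1 pf3.2 (by rw [hp2])
              exfalso
              have hlen : 4 ≤ (splitRec clock).length := by
                rw [e1, e2, e3]
                have := List.length_pos_of_ne_nil (splitRec_ne_nil pf3.1)
                simp
                omega
              omega

-- core 2a: with four or more fields, A reads only the first field as seconds
lemma a_big (days : Int) (clock : List Char) (h4 : 4 ≤ (splitRec clock).length) :
    days * 86400 +
      (match (splitRec clock).map String.ofList with
        | [h, m, s] => (to_int h 0, to_int m 0, to_int s 0)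
        | [m, s] => ((0 : Int), to_int m 0, to_int s 0)
        | p :: _ => ((0 : Int), (0 : Int), to_int p 0)
        | [] => ((0 : Int), (0 : Int), (0 : Int))).1 * 3600 +
      (match (splitRec clock).map String.ofList with
        | [h, m, s] => (to_int h 0, to_int m 0, to_int s 0)
        | [m, s] => ((0 : Int), to_int m 0, to_int s 0)
        | p :: _ => ((0 : Int), (0 : Int), to_int p 0)
        | [] => ((0 : Int), (0 : Int), (0 : Int))).2.1 * 60 +
      (match (splitRec clock).map String.ofList with
        | [h, m, s] => (to_int h 0, to_int m 0, to_int s 0)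
        | [m, s] => ((0 : Int), to_int m 0, to_int s 0)
        | p :: _ => ((0 : Int), (0 : Int), to_int p 0)
        | [] => ((0 : Int), (0 : Int), (0 : Int))).2.2 =
    days * 86400 + fieldVal ((splitRec clock).headD []) := by
  rcases hfs : splitRec clock with _ | ⟨a, _ | ⟨b, _ | ⟨c, _ | ⟨d, t⟩⟩⟩⟩ <;>
    rw [hfs] at h4 <;> simp at h4 <;> try omega
  simp [to_int_ofList, fieldVal_eq]

-- core 2b: with four or more fields, B reads the trailing three fields as H:M:S
lemma big_eval (days : Int) (clock : List Char) (h4 : 4 ≤ (splitRec clock).length) :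
    peel 3 (days * 86400) 1 clock =
      days * 86400 + 3600 * fieldVal ((splitRec clock).reverse.getD 2 []) +
        60 * fieldVal ((splitRec clock).reverse.getD 1 []) +
        fieldVal ((splitRec clock).reverse.getD 0 []) := by
  obtain ⟨p1, f1, hp1⟩ := rpart_some_of_len clock (by omega)
  have e1 := splitRec_rpart_some clock p1 f1 hp1
  have l1 : 3 ≤ (splitRec p1).length := by rw [e1] at h4; simp at h4; omega
  obtain ⟨p2, f2, hp2⟩ := rpart_some_of_len p1 (by omega)
  have e2 := splitRec_rpart_some p1 p2 f2 hp2
  have l2 : 2 ≤ (splitRec p2).length := by rw [e2] at l1; simp at l1; omega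
  obtain ⟨p3, f3, hp3⟩ := rpart_some_of_len p2 l2
  have e3 := splitRec_rpart_some p2 p3 f3 hp3
  have hr : (splitRec clock).reverse = f1 :: f2 :: f3 :: (splitRec p3).reverse := by
    rw [e1, e2, e3]; simp
  rw [show (3 : Nat) = 2 + 1 from rfl, peel, hp1]
  simp only [if_neg (by norm_num : ¬ (1 : Int) = 3600)]
  rw [show (2 : Nat) = 1 + 1 from rfl, peel, hp2]
  simp only [if_neg (by norm_num : ¬ (1 * 60 : Int) = 3600)]
  rw [show (1 : Nat) = 0 + 1 from rfl, peel, hp3]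
  simp only [if_pos (by norm_num : (1 * 60 * 60 : Int) = 3600)]
  rw [hr]
  simp [fieldVal_eq]
  ring

-- takeWhile/dropWhile over p ++ c :: q when c is not in p (used for both separators)
-- with ≥4 fields, the three trailing fields named by D_ are the getD fields of splitRec
-- the clock part named by D_ is exactly what partDash / A's day split leave behind
lemma dropWhile_dash (p q : List Char) (hnp : '-' ∉ p) :
    ((p ++ '-' :: q).dropWhile (· ≠ '-')).tail = q := by
  induction p with
  | nil =>
      rw [List.nil_append, List.dropWhile_cons, if_neg (by simp)]
      rfl
  | cons x p ih =>
      have hx : x ≠ '-' := fun h => hnp (by simp [h])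
      rw [List.cons_append, List.dropWhile_cons, if_pos (by simp [hx])]
      exact ih (fun h => hnp (List.mem_cons_of_mem _ h))

lemma partDash_clock (cs p q : List Char) (h : partDash cs = some (p, q)) :
    (cs.dropWhile (· ≠ '-')).tail = q := by
  obtain ⟨hcs, hnp⟩ := partDash_spec cs p q h
  subst hcs
  exact dropWhile_dash p q hnp

-- reduction: on a nonempty input both ports compute a (days, clock) pair, clock being
-- exactly the string D_ names, and then their respective clock computations
lemma reduce (etime : String) (h0 : etime.toList ≠ []) :
    ∃ (days : Int) (clock : List Char),
      clock = (if etime.toList.contains '-' then (etime.toList.dropWhile (· ≠ '-')).tail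
               else etime.toList) ∧
      etime_to_seconds_py etime =
        days * 86400 +
          (match (splitRec clock).map String.ofList with
            | [h, m, s] => (to_int h 0, to_int m 0, to_int s 0)
            | [m, s] => ((0 : Int), to_int m 0, to_int s 0)
            | p :: _ => ((0 : Int), (0 : Int), to_int p 0)
            | [] => ((0 : Int), (0 : Int), (0 : Int))).1 * 3600 +
          (match (splitRec clock).map String.ofList with
            | [h, m, s] => (to_int h 0, to_int m 0, to_int s 0)
            | [m, s] => ((0 : Int), to_int m 0, to_int s 0)
            | p :: _ => ((0 : Int), (0 : Int), to_int p 0)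
            | [] => ((0 : Int), (0 : Int), (0 : Int))).2.1 * 60 +
          (match (splitRec clock).map String.ofList with
            | [h, m, s] => (to_int h 0, to_int m 0, to_int s 0)
            | [m, s] => ((0 : Int), to_int m 0, to_int s 0)
            | p :: _ => ((0 : Int), (0 : Int), to_int p 0)
            | [] => ((0 : Int), (0 : Int), (0 : Int))).2.2 ∧
      etime_to_seconds_py_alt etime = peel 3 (days * 86400) 1 clock := by
  unfold etime_to_seconds_py etime_to_seconds_py_alt
  rw [if_neg h0]
  cases hpd : partDash etime.toList with
  | some dp =>
      obtain ⟨dp1, dp2⟩ := dp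
      have hmem : '-' ∈ etime.toList := by
        rcases (partDash_spec etime.toList dp1 dp2 hpd) with ⟨hcs, _⟩
        rw [hcs]; simp
      have hin : PySem.Str.isIn "-" etime = true := by
        rw [PySem.Str.isIn_iff_infix]
        exact (List.singleton_infix_iff '-' etime.toList).mpr hmem
      rw [hin]
      simp only [if_true]
      have hsm : PySem.Str.splitMax? etime "-" 1 =
          some [String.ofList dp1, String.ofList dp2] := by
        unfold PySem.Str.splitMax? PySem.Chars.splitMax? PySem.Chars.splitOnMax
        rw [show ("-" : String).toList = ['-'] from rfl]
        simp only [List.isEmpty_cons, Bool.false_eq_true, if_false,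
          if_neg (by norm_num : ¬ (1 : Int) < 0)]
        rw [show ((1 : Int)).toNat = 1 from rfl,
          splitOnMax_go_dash_one (etime.toList.length + 1) etime.toList [] [] (by omega), hpd]
        rfl
      rw [hsm]
      have hclock : (String.ofList dp2).toList = dp2 := String.toList_ofList
      have hsp : PySem.Str.split? (String.ofList dp2) ":" = some ((splitRec dp2).map String.ofList) := by
        unfold PySem.Str.split? PySem.Chars.split?
        rw [hclock, show (":" : String).toList = [':'] from rfl]
        simp [splitOn_colon_eq]
      refine ⟨to_int (String.ofList dp1) 0, dp2, ?_, ?_, ?_⟩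
      · rw [if_pos (show etime.toList.contains '-' = true by simpa using hmem),
          partDash_clock etime.toList dp1 dp2 hpd]
      · simp only [hsp, Option.getD_some]
      · rw [show to_int_b dp1 0 = to_int (String.ofList dp1) 0 from (to_int_ofList dp1 0).symm]
  | none =>
      have hnmem : '-' ∉ etime.toList := (partDash_none_iff etime.toList).mp hpd
      have hin : PySem.Str.isIn "-" etime = false := by
        rw [← Bool.not_eq_true, PySem.Str.isIn_iff_infix]
        intro hinf
        exact hnmem ((List.singleton_infix_iff '-' etime.toList).mp hinf)
      rw [hin]
      simp only [Bool.false_eq_true, if_false]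
      have hsp : PySem.Str.split? etime ":" = some ((splitRec etime.toList).map String.ofList) := by
        unfold PySem.Str.split? PySem.Chars.split?
        rw [show (":" : String).toList = [':'] from rfl]
        simp [splitOn_colon_eq]
      refine ⟨0, etime.toList, ?_, ?_, ?_⟩
      · rw [if_neg (show ¬ etime.toList.contains '-' = true by simpa using hnmem)]
      · simp only [hsp, Option.getD_some]
      · rfl

-- ===== VERDICT (by name: the statement is the Claim_ definition above) =====
theorem etime_to_seconds_py_spec : Claim_unchanged_etime_to_seconds_py := by
  intro etime _ hnD
  unfold D_etime_to_seconds_py at hnD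
  by_cases h0 : etime.toList = []
  · unfold etime_to_seconds_py etime_to_seconds_py_alt
    rw [if_pos h0, h0]
    simp [partDash, peel, rpartColon, to_int_b, PySem.Int.ofChars?]
    rfl
  · obtain ⟨days, clock, hclock, hA, hB⟩ := reduce etime h0
    rw [hA, hB]
    rw [← hclock] at hnD
    rw [splitOn_colon_eq] at hnD
    simp only [not_and_or] at hnD
    rcases hnD with h4' | hne
    · exact clock_eq days clock (by omega)
    · have heq := not_not.mp hne
      beta_reduce at heq
      by_cases h4 : 4 ≤ (splitRec clock).length
      · rw [a_big days clock h4, big_eval days clock h4, heq]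
        ring
      · exact clock_eq days clock (by omega)

theorem etime_to_seconds_py_changed : Claim_changed_etime_to_seconds_py := by
  unfold Claim_changed_etime_to_seconds_py; decide

theorem etime_to_seconds_py_tight : Claim_exact_etime_to_seconds_py := by
  intro etime _ hD
  unfold D_etime_to_seconds_py at hD
  have h0 : etime.toList ≠ [] := by
    intro h0
    rw [h0] at hD
    simp [splitOn_colon_eq, splitRec] at hD
  obtain ⟨days, clock, hclock, hA, hB⟩ := reduce etime h0
  rw [hA, hB]
  rw [← hclock] at hD
  rw [splitOn_colon_eq] at hD
  obtain ⟨h4, hne⟩ := hD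
  beta_reduce at hne
  rw [a_big days clock h4, big_eval days clock h4]
  intro hcontra
  exact hne (by omega)
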